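-- pv_equiv track=rewrite | github.com/jithinvijayan007/erp1 | na_enquiry/views.py | paginate_data
-- ===== SOURCE A (Python) =====
-- def paginate_data(dct_data,int_page_legth):
--     dct_paged = {}
--     int_count = 1
--     for key in dct_data:
--         if int_count not in dct_paged:
--             dct_paged[int_count]={}
--             dct_paged[int_count][key]=dct_data[key]
--         elif len(dct_paged[int_count]) < int_page_legth:
--             dct_paged[int_count][key]= dct_data[key]
--         else:
--             int_count += 1
--             dct_paged[int_count] ={}
--             dct_paged[int_count][key] = dct_data[key]
--     return dct_paged
-- ===== SOURCE B (Python) =====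
-- def paginate_data(dct_data, int_page_legth):
--     size = max(int_page_legth, 1)
--     dct_paged = {}
--     for i, (key, value) in enumerate(dct_data.items()):
--         dct_paged.setdefault(i // size + 1, {})[key] = value
--     return dct_paged
-- ===== Notes on version B (the rewrite author's own statement) =====
-- stated objective: idiomatic
-- what changed: B computes each entry's page number directly as i // max(int_page_legth,1) + 1 from its position via enumerate and setdefault, instead of A's incremental fill counter with a three-way branch that detects when a page is full.
import Mathlib
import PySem

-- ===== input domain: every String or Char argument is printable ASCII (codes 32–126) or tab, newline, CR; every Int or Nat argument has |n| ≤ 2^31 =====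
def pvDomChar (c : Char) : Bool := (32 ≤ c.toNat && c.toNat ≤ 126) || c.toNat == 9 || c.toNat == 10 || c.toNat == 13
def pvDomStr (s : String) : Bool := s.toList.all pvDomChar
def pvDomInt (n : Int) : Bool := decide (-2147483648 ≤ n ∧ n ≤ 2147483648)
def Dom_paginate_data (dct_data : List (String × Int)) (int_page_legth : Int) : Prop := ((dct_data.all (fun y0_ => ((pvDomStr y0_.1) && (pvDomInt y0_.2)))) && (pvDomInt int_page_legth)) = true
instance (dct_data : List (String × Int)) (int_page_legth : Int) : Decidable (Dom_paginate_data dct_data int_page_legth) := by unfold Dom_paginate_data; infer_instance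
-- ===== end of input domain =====

-- B derives each entry's page index by position arithmetic (enumerate + i // max(size,1) + 1)
-- instead of A's fill counter with a three-way branch; equivalence proved on key-nodup inputs.

-- ===== PORT A =====
-- one for-loop step of A: three-way branch on the current page
def pvStepA (n : Int) (st : PySem.Dict Int (PySem.Dict String Int) × Int)
    (kv : String × Int) : PySem.Dict Int (PySem.Dict String Int) × Int :=
  match st.1.get? st.2 with
  | none => (st.1.insert st.2 (PySem.Dict.empty.insert kv.1 kv.2), st.2)
  | some page =>
      if (page.size : Int) < n then
        (st.1.insert st.2 (page.insert kv.1 kv.2), st.2)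
      else
        (st.1.insert (st.2 + 1) (PySem.Dict.empty.insert kv.1 kv.2), st.2 + 1)

def paginate_data (dct_data : List (String × Int)) (int_page_legth : Int) :
    List (Int × List (String × Int)) :=
  ((dct_data.foldl (pvStepA int_page_legth) (PySem.Dict.empty, 1)).1.items.map
    (fun p => (p.1, p.2.items)))

-- ===== PORT B =====
-- one loop step of B: dct_paged.setdefault(i // size + 1, {})[key] = value
def pvStepB (size : Int) (d : PySem.Dict Int (PySem.Dict String Int))
    (p : Int × (String × Int)) : PySem.Dict Int (PySem.Dict String Int) :=
  let pg := PySem.Int.floordiv p.1 size + 1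
  d.insert pg ((d.getD pg PySem.Dict.empty).insert p.2.1 p.2.2)

def paginate_data_alt (dct_data : List (String × Int)) (int_page_legth : Int) :
    List (Int × List (String × Int)) :=
  let size := max int_page_legth 1
  (((PySem.List.enumerate dct_data 0).foldl (pvStepB size) PySem.Dict.empty).items.map
    (fun p => (p.1, p.2.items)))

-- ===== PRECONDITION & SPEC =====
-- Pre_ excludes lists with duplicate keys, which do not represent any Python dict
-- (a Python dict merges them before paginate_data ever sees them).
def Pre_paginate_data (dct_data : List (String × Int)) (int_page_legth : Int) : Prop :=
  (dct_data.map Prod.fst).Nodup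
instance (dct_data : List (String × Int)) (int_page_legth : Int) : Decidable (Pre_paginate_data dct_data int_page_legth) := by unfold Pre_paginate_data; infer_instance

def pvWitness_paginate_data : (List (String × Int)) × Int := ([("a", 1), ("b", 2), ("c", 3)], 2)

def Spec_paginate_data (dct_data : List (String × Int)) (int_page_legth : Int) (out : List (Int × List (String × Int))) : Prop := out = paginate_data_alt dct_data int_page_legth
instance (dct_data : List (String × Int)) (int_page_legth : Int) (out : List (Int × List (String × Int))) : Decidable (Spec_paginate_data dct_data int_page_legth out) := by unfold Spec_paginate_data; infer_instance

-- ===== CLAIM (what is proved, stated in full; the proofs are below) =====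
def Claim_equal_paginate_data : Prop := ∀ (dct_data : List (String × Int)) (int_page_legth : Int), Dom_paginate_data dct_data int_page_legth → Pre_paginate_data dct_data int_page_legth → Spec_paginate_data dct_data int_page_legth (paginate_data dct_data int_page_legth)

-- ===== LEMMAS AND PROOFS =====

-- proof-side abbreviations for the two folds
def pvAF (n : Int) (xs : List (String × Int)) : PySem.Dict Int (PySem.Dict String Int) × Int :=
  xs.foldl (pvStepA n) (PySem.Dict.empty, 1)

def pvBF (n : Int) (xs : List (String × Int)) : PySem.Dict Int (PySem.Dict String Int) :=
  (PySem.List.enumerate xs 0).foldl (pvStepB (max n 1)) PySem.Dict.empty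

lemma pvAF_append (n : Int) (xs : List (String × Int)) (x : String × Int) :
    pvAF n (xs ++ [x]) = pvStepA n (pvAF n xs) x := by
  simp [pvAF, List.foldl_append]

lemma pvBF_append (n : Int) (xs : List (String × Int)) (x : String × Int) :
    pvBF n (xs ++ [x]) = pvStepB (max n 1) (pvBF n xs) ((xs.length : Int), x) := by
  simp [pvBF, PySem.List.enumerate_append, List.foldl_append,
        PySem.List.enumerate_cons, PySem.List.enumerate_nil]

lemma pv_cond (n : Int) (ℓ : Nat) (h1 : 1 ≤ ℓ) : ((ℓ : Int) < n) ↔ ℓ < (max n 1).toNat := by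
  omega

-- loop invariant: after a nonempty nodup-keyed prefix of length q·s+ℓ (s = max(n,1), 1 ≤ ℓ ≤ s),
-- A's counter is q+1, its current page pg has size ℓ with keys among the prefix keys, no page
-- beyond q+1 exists, and A's dict equals B's dict.
lemma pv_inv (n : Int) (xs : List (String × Int)) :
    (xs.map Prod.fst).Nodup → xs ≠ [] →
    ∃ (q ℓ : Nat) (pg : PySem.Dict String Int),
      xs.length = q * (max n 1).toNat + ℓ ∧ 1 ≤ ℓ ∧ ℓ ≤ (max n 1).toNat ∧
      (pvAF n xs).2 = (q : Int) + 1 ∧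
      (pvAF n xs).1.get? ((q : Int) + 1) = some pg ∧
      pg.size = ℓ ∧
      (∀ key, key ∈ pg.keys → key ∈ xs.map Prod.fst) ∧
      (∀ j : Int, (q : Int) + 1 < j → (pvAF n xs).1.get? j = none) ∧
      (pvAF n xs).1 = pvBF n xs := by
  induction xs using List.reverseRecOn with
  | nil => intro _ h; exact absurd rfl h
  | append_singleton xs x ih =>
    intro hnd _
    have hs1 : 1 ≤ (max n 1).toNat := by omega
    have hsmax : (((max n 1).toNat : Nat) : Int) = max n 1 := by omega
    have hnd2 := hnd
    rw [List.map_append, List.nodup_append] at hnd2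
    obtain ⟨hnd', hx1, hdisj⟩ := hnd2
    have hx : x.1 ∉ xs.map Prod.fst := fun hm => hdisj x.1 hm x.1 (by simp) rfl
    by_cases hxs : xs = []
    · subst hxs
      refine ⟨0, 1, PySem.Dict.empty.insert x.1 x.2, by simp, le_refl 1, hs1, ?_, ?_, ?_, ?_, ?_, ?_⟩
      · simp [pvAF, pvStepA, PySem.Dict.get?_empty]
      · simp [pvAF, pvStepA, PySem.Dict.get?_empty, PySem.Dict.get?_insert_self]
      · simp [PySem.Dict.size_insert, PySem.Dict.contains_empty, PySem.Dict.size_empty]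
      · intro key hk
        rw [PySem.Dict.mem_keys_insert] at hk
        simpa [PySem.Dict.keys_empty] using hk
      · intro j hj
        simp only [List.nil_append, pvAF, List.foldl, pvStepA, PySem.Dict.get?_empty]
        rw [PySem.Dict.get?_insert_of_ne _ _ (by omega : j ≠ 1)]
        exact PySem.Dict.get?_empty j
      · simp [pvAF, pvBF, pvStepA, pvStepB, PySem.List.enumerate_cons, PySem.List.enumerate_nil,
              PySem.Dict.get?_empty, PySem.Dict.getD_empty]
    · obtain ⟨q, ℓ, pg, hlen, h1, h2, hc, hget, hsz, hkeys, hnone, hAB⟩ := ih hnd' hxs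
      have hxpg : pg.contains x.1 = false := by
        cases hcb : pg.contains x.1 with
        | false => rfl
        | true => exact absurd (hkeys _ ((PySem.Dict.contains_iff_mem_keys pg x.1).1 hcb)) hx
      have hAstep := pvAF_append n xs x
      have hBstep := pvBF_append n xs x
      have hdiv : PySem.Int.floordiv ((xs.length : Nat) : Int) (max n 1)
          = ((xs.length / (max n 1).toNat : Nat) : Int) := by
        rw [← hsmax, PySem.Int.floordiv_natCast]
        simp
      by_cases hlt : ℓ < (max n 1).toNat
      · -- page not yet full: A takes the elif branch, B lands on the same page q+1
        have hcond : ((pg.size : Int) < n) := by rw [hsz]; exact (pv_cond n ℓ h1).2 hlt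
        have hA : pvAF n (xs ++ [x])
            = ((pvAF n xs).1.insert ((q : Int) + 1) (pg.insert x.1 x.2), (q : Int) + 1) := by
          rw [hAstep]; unfold pvStepA; rw [hc, hget]
          simp only [if_pos hcond]
        have hndvq : xs.length / (max n 1).toNat = q := by
          rw [hlen, Nat.add_comm, Nat.add_mul_div_right _ _ (by omega : 0 < (max n 1).toNat),
              Nat.div_eq_of_lt hlt, Nat.zero_add]
        have hgetB : (pvBF n xs).getD ((q : Int) + 1) PySem.Dict.empty = pg :=
          PySem.Dict.getD_of_get?_eq_some _ _ (hAB ▸ hget)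
        have hB : pvBF n (xs ++ [x])
            = (pvBF n xs).insert ((q : Int) + 1) (pg.insert x.1 x.2) := by
          rw [hBstep]; unfold pvStepB
          simp only [hdiv, hndvq]
          rw [hgetB]
        refine ⟨q, ℓ + 1, pg.insert x.1 x.2, ?_, by omega, by omega, ?_, ?_, ?_, ?_, ?_, ?_⟩
        · simp only [List.length_append, List.length_cons, List.length_nil, hlen]; omega
        · rw [hA]
        · rw [hA]; exact PySem.Dict.get?_insert_self _ _ _
        · rw [PySem.Dict.size_insert, hxpg]; simp [hsz]
        · intro key hk
          rw [PySem.Dict.mem_keys_insert] at hk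
          rw [List.map_append]
          rcases hk with h | h
          · simp [h]
          · exact List.mem_append_left _ (hkeys _ h)
        · intro j hj
          rw [hA]
          simp only
          rw [PySem.Dict.get?_insert_of_ne _ _ (by omega : j ≠ (q : Int) + 1)]
          exact hnone j hj
        · rw [hA, hB, hAB]
      · -- page full: A opens page q+2, and so does B
        have hls : ℓ = (max n 1).toNat := by omega
        have hcond : ¬ ((pg.size : Int) < n) := by
          rw [hsz]; intro hcc; exact absurd ((pv_cond n ℓ h1).1 hcc) hlt
        have hA : pvAF n (xs ++ [x])
            = ((pvAF n xs).1.insert ((q : Int) + 1 + 1) (PySem.Dict.empty.insert x.1 x.2),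
               (q : Int) + 1 + 1) := by
          rw [hAstep]; unfold pvStepA; rw [hc, hget]
          simp only [if_neg hcond]
        have hndvq : xs.length / (max n 1).toNat = q + 1 := by
          rw [hlen, hls, Nat.add_comm, Nat.add_mul_div_right _ _ (by omega : 0 < (max n 1).toNat),
              Nat.div_self (by omega : 0 < (max n 1).toNat)]
          omega
        have hgetB : (pvBF n xs).getD ((q : Int) + 1 + 1) PySem.Dict.empty = PySem.Dict.empty :=
          PySem.Dict.getD_of_get?_eq_none _ _ (hAB ▸ hnone _ (by omega))
        have hB : pvBF n (xs ++ [x])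
            = (pvBF n xs).insert ((q : Int) + 1 + 1) (PySem.Dict.empty.insert x.1 x.2) := by
          rw [hBstep]; unfold pvStepB
          simp only [hdiv, hndvq]
          rw [show (((q + 1 : Nat) : Int) + 1) = (q : Int) + 1 + 1 by push_cast; ring, hgetB]
        have hmul : (q + 1) * (max n 1).toNat = q * (max n 1).toNat + (max n 1).toNat := by ring
        refine ⟨q + 1, 1, PySem.Dict.empty.insert x.1 x.2, ?_, le_refl 1, hs1, ?_, ?_, ?_, ?_, ?_, ?_⟩
        · simp only [List.length_append, List.length_cons, List.length_nil, hlen]; omega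
        · rw [hA]; push_cast; ring
        · rw [hA]
          simp only
          rw [show (((q + 1 : Nat) : Int) + 1) = (q : Int) + 1 + 1 by push_cast; ring]
          exact PySem.Dict.get?_insert_self _ _ _
        · simp [PySem.Dict.size_insert, PySem.Dict.contains_empty, PySem.Dict.size_empty]
        · intro key hk
          rw [PySem.Dict.mem_keys_insert] at hk
          rw [List.map_append]
          rcases hk with h | h
          · simp [h]
          · simp [PySem.Dict.keys_empty] at h
        · intro j hj
          rw [hA]
          simp only
          rw [PySem.Dict.get?_insert_of_ne _ _ (by omega : j ≠ (q : Int) + 1 + 1)]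
          exact hnone j (by omega)
        · rw [hA, hB, hAB]

theorem paginate_data_spec : Claim_equal_paginate_data := by
  intro dd n _ hpre
  unfold Spec_paginate_data
  by_cases h : dd = []
  · subst h; rfl
  · obtain ⟨q, ℓ, pg, _, _, _, _, _, _, _, _, hAB⟩ := pv_inv n dd hpre h
    have hA : paginate_data dd n = ((pvAF n dd).1.items.map (fun p => (p.1, p.2.items))) := rfl
    have hB : paginate_data_alt dd n = ((pvBF n dd).items.map (fun p => (p.1, p.2.items))) := rfl
    rw [hA, hB, hAB]
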